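-- pv_equiv track=rewrite | github.com/WELWEL63/Lab_week6 | decrypt_cypher_text - Copy.py | decrypt_cypher_text
-- ===== SOURCE A (Python) =====
-- def decrypt_cypher_text(encrypted_text, key):
-- #     # function implementation here...
--
--     decrypted_text = ""  # Initialize an empty string to store the decrypted text
--
--     # Loop through each character in the encrypted text
--     for char in encrypted_text:
--         # Step 1: Convert character to its ASCII code using ord()
--         ascii_code = ord(char)
--
--         # Step 2: Subtract the key from the ASCII code
--         adjusted_code = ascii_code - key
--
--         # Step 3: Find the remainder when divided by 256
--         decrypted_code = adjusted_code % 256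
--
--         # Step 4: Convert the resulting ASCII code back to a character using chr()
--         decrypted_char = chr(decrypted_code)
--
--         # Append the decrypted character to the result
--         decrypted_text += decrypted_char
--
--     # Return the fully decrypted text
--     return decrypted_text
-- ===== SOURCE B (Python) =====
-- def decrypt_cypher_text(encrypted_text, key):
--     table = {ord(c): (ord(c) - key) % 256 for c in set(encrypted_text)}
--     return encrypted_text.translate(table)
-- ===== Notes on version B (the rewrite author's own statement) =====
-- stated objective: faster
-- what changed: Replaces the explicit per-character string-accumulation loop with a precomputed translation table over the string's distinct characters followed by a single str.translate call, which does the rewrite in C instead of bytecode.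
import Mathlib
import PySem

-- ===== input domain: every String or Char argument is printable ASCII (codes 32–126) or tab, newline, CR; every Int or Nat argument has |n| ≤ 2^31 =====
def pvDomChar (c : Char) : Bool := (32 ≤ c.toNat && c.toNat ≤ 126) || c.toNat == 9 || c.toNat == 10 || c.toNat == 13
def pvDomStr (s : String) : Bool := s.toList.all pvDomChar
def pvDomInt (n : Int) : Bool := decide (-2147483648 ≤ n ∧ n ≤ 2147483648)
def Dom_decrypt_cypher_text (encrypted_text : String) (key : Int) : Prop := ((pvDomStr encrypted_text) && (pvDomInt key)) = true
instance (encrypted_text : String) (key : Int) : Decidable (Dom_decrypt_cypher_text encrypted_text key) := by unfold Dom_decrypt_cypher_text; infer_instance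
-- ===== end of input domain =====

-- B precomputes a translation table over the distinct characters and rewrites via str.translate
-- instead of A's per-character accumulation loop (objective: faster; a timing run measured B faster at the largest size).

-- ===== PORT A =====
-- for char in encrypted_text: decrypted_text += chr((ord(char) - key) % 256)
def decrypt_cypher_text (encrypted_text : String) (key : Int) : String :=
  encrypted_text.toList.foldl
    (fun decrypted_text char =>
      decrypted_text.push (Char.ofNat (PySem.Int.mod ((char.toNat : Int) - key) 256).toNat))
    ""

-- ===== PORT B =====
-- table = {ord(c): (ord(c) - key) % 256 for c in set(encrypted_text)}; return encrypted_text.translate(table)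
-- str.translate with an int→int table is ported by hand (exact here: lookup ord(c),
-- map hit to chr(value), keep the character on a miss).
def decrypt_cypher_text_alt (encrypted_text : String) (key : Int) : String :=
  let table : PySem.Dict Int Int :=
    (PySem.Set.ofList encrypted_text.toList).foldl
      (fun d c => d.insert (c.toNat : Int) (PySem.Int.mod ((c.toNat : Int) - key) 256))
      PySem.Dict.empty
  String.ofList (encrypted_text.toList.map (fun c =>
    match table.get? (c.toNat : Int) with
    | some v => Char.ofNat v.toNat
    | none => c))

-- ===== PRECONDITION & SPEC =====
def Spec_decrypt_cypher_text (encrypted_text : String) (key : Int) (out : String) : Prop := out = decrypt_cypher_text_alt encrypted_text key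
instance (encrypted_text : String) (key : Int) (out : String) : Decidable (Spec_decrypt_cypher_text encrypted_text key out) := by unfold Spec_decrypt_cypher_text; infer_instance

-- ===== CLAIM (what is proved, stated in full; the proofs are below) =====
def Claim_equal_decrypt_cypher_text : Prop := ∀ (encrypted_text : String) (key : Int), Dom_decrypt_cypher_text encrypted_text key → Spec_decrypt_cypher_text encrypted_text key (decrypt_cypher_text encrypted_text key)

-- ===== LEMMAS AND PROOFS =====

theorem pv_char_toNat_inj {a b : Char} (h : a.toNat = b.toNat) : a = b := by
  have := congrArg Char.ofNat h
  simpa [Char.ofNat_toNat] using this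

-- lookup in the table built by folding key-determined inserts
theorem pv_get?_table (key : Int) (l : List Char) (d : PySem.Dict Int Int) (c : Char)
    (h : c ∈ l ∨ d.get? (c.toNat : Int) =
        some (PySem.Int.mod ((c.toNat : Int) - key) 256)) :
    (l.foldl (fun d x => d.insert (x.toNat : Int) (PySem.Int.mod ((x.toNat : Int) - key) 256)) d).get?
        (c.toNat : Int) = some (PySem.Int.mod ((c.toNat : Int) - key) 256) := by
  induction l generalizing d with
  | nil => simpa using h.resolve_left (by simp)
  | cons x xs ih =>
    simp only [List.foldl_cons]
    apply ih
    by_cases hc : c ∈ xs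
    · exact Or.inl hc
    · right
      rcases h with h | h
      · rcases List.mem_cons.mp h with rfl | h
        · exact PySem.Dict.get?_insert_self _ _ _
        · exact absurd h hc
      · by_cases hx : (c.toNat : Int) = (x.toNat : Int)
        · have : c = x := pv_char_toNat_inj (by exact_mod_cast hx)
          subst this
          exact PySem.Dict.get?_insert_self _ _ _
        · rw [PySem.Dict.get?_insert_of_ne _ _ hx]
          exact h

-- A's accumulation loop produces the mapped list
theorem pv_foldl_push (g : Char → Char) (l : List Char) (acc : String) :
    l.foldl (fun a c => a.push (g c)) acc = String.ofList (acc.toList ++ l.map g) := by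
  induction l generalizing acc with
  | nil => simp [String.ofList_toList]
  | cons x xs ih =>
    simp only [List.foldl_cons, List.map_cons, ih, String.toList_push]
    simp

-- ===== VERDICT (by name: the statement is the Claim_ definition above) =====
theorem decrypt_cypher_text_spec : Claim_equal_decrypt_cypher_text := by
  intro s key _
  unfold Spec_decrypt_cypher_text decrypt_cypher_text decrypt_cypher_text_alt
  rw [pv_foldl_push]
  simp only [String.toList_empty, List.nil_append]
  congr 1
  apply List.map_congr_left
  intro c hc
  have hmem : c ∈ PySem.Set.ofList s.toList := (PySem.Set.mem_ofList _ _).mpr hc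
  rw [pv_get?_table key _ _ _ (Or.inl hmem)]
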